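-- pv_equiv track=rewrite | github.com/johnzhoudev/leetcode-practice | grokking_new_list/1009. Complement of Base 10 Integer.py | solve
-- ===== SOURCE A (Python) =====
-- def solve(n):
--     # reverse using bit arithmetic
--     if n == 0: return 1
--     x = 0
--     base = 1
--     while n > 0:
--         x += base * (1 - (n & 1))
--         n = n >> 1
--         base *= 2
--
--     return x
-- ===== SOURCE B (Python) =====
-- def solve(n):
--     # closed form: the all-ones mask over n's significant bits, minus n
--     if n == 0:
--         return 1
--     return (1 << n.bit_length()) - 1 - n
-- ===== Notes on version B (the rewrite author's own statement) =====
-- stated objective: simpler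
-- what changed: Replaces the per-bit accumulation loop by a closed-form expression, the all-ones mask (1 << n.bit_length()) - 1 minus n; Pre_ restricts to the natural domain of nonnegative integers, excluding negative inputs where the two differ.
-- outside the precondition, e.g. on solve(-3): A returns 0, B returns 6
import Mathlib
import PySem

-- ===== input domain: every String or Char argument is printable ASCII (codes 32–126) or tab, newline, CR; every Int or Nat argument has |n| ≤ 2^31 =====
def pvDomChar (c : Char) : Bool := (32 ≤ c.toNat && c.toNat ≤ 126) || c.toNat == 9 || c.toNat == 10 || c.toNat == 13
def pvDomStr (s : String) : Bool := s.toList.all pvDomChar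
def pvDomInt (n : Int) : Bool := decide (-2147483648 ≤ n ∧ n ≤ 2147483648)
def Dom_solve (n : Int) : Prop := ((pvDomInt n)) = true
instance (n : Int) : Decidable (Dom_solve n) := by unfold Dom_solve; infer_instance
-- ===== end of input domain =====

-- B replaces A's per-bit accumulation loop by the closed form (2^bit_length(n)) - 1 - n;
-- Pre_solve restricts to the natural domain of nonnegative integers.


-- ===== PORT A =====
-- while n > 0: x += base * (1 - (n & 1)); n >>= 1; base *= 2
-- (for n > 0, Python's n & 1 is n % 2 and n >> 1 is n / 2, both nonnegative here)
def solveLoop (n x base : Int) : Int :=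
  if h : 0 < n then
    solveLoop (n / 2) (x + base * (1 - n % 2)) (base * 2)
  else x
termination_by n.toNat
decreasing_by
  have h2 : n / 2 < n := by omega
  omega

def solve (n : Int) : Int :=
  if n = 0 then 1
  else solveLoop n 0 1

-- ===== PORT B =====
-- Python int.bit_length() of a nonzero integer m is Nat.log2 |m| + 1 (exact on m ≠ 0)
def solve_alt (n : Int) : Int :=
  if n = 0 then 1
  else 2 ^ (Nat.log2 n.natAbs + 1) - 1 - n

-- ===== PRECONDITION & SPEC =====
-- Pre_ restricts to the natural domain of nonnegative base-10 integers; negative inputs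
-- are excluded (see claim.json cites for what each program does there).
def Pre_solve (n : Int) : Prop := 0 ≤ n
instance (n : Int) : Decidable (Pre_solve n) := by unfold Pre_solve; infer_instance
def pvWitness_solve : Int := 5
def Spec_solve (n : Int) (out : Int) : Prop := out = solve_alt n
instance (n : Int) (out : Int) : Decidable (Spec_solve n out) := by unfold Spec_solve; infer_instance

-- ===== CLAIM (what is proved, stated in full; the proofs are below) =====
def Claim_equal_solve : Prop := ∀ (n : Int), Dom_solve n → Pre_solve n → Spec_solve n (solve n)

-- ===== LEMMAS AND PROOFS =====

lemma loop_closed_form : ∀ m : Nat, 0 < m → ∀ x base : Int,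
    solveLoop (m : Int) x base = x + base * (2 ^ (Nat.log2 m + 1) - 1 - (m : Int)) := by
  intro m
  induction m using Nat.strong_induction_on with
  | _ m ih =>
    intro hm x base
    rw [solveLoop]
    have hpos : (0 : Int) < (m : Int) := by exact_mod_cast hm
    rw [dif_pos hpos]
    have hdiv : (m : Int) / 2 = ((m / 2 : Nat) : Int) := by push_cast; omega
    have hmod : (m : Int) % 2 = ((m % 2 : Nat) : Int) := by push_cast; omega
    by_cases h2 : 2 ≤ m
    · -- recursive case: m / 2 > 0
      have hq : 0 < m / 2 := Nat.div_pos h2 (by norm_num)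
      rw [hdiv, hmod, ih (m / 2) (by omega) hq]
      have hlog : Nat.log2 m = Nat.log2 (m / 2) + 1 := by
        rw [Nat.log2_eq_log_two, Nat.log2_eq_log_two,
          Nat.log_of_one_lt_of_le one_lt_two h2]
      rw [hlog]
      have hm2 : (m : Int) = 2 * ((m / 2 : Nat) : Int) + ((m % 2 : Nat) : Int) := by
        push_cast
        omega
      have hpow : (2 : Int) ^ (Nat.log2 (m / 2) + 1 + 1) = 2 * 2 ^ (Nat.log2 (m / 2) + 1) := by
        ring
      rw [hpow, hm2]
      ring
    · -- m = 1: one more unfolding, then the loop stops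
      have hm1 : m = 1 := by omega
      subst hm1
      rw [hdiv, hmod]
      rw [solveLoop]
      have h1 : Nat.log2 1 = 0 := by decide
      norm_num [h1]

-- ===== VERDICT (by name: the statement is the Claim_ definition above) =====
theorem solve_spec : Claim_equal_solve := by
  intro n _ hpre
  unfold Spec_solve solve solve_alt
  by_cases h0 : n = 0
  · simp [h0]
  · rw [if_neg h0, if_neg h0]
    have hn : 0 < n := lt_of_le_of_ne hpre (Ne.symm h0)
    have hcast : n = (n.natAbs : Int) := by omega
    rw [hcast, loop_closed_form n.natAbs (by omega) 0 1]
    rw [show ((n.natAbs : Int)).natAbs = n.natAbs from rfl]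
    ring
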